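-- pv_equiv track=rewrite | github.com/MrBrantCode/unitest_baseline | mut_generate/mist_train_cf/cf_81586/solution.py | anagram_checker
-- ===== SOURCE A (Python) =====
-- from collections import Counter
-- import math
--
-- def anagram_checker(str1, str2):
--     str1 = str1.lower().replace(" ", "").replace(",", "").replace(".", "")
--     str2 = str2.lower().replace(" ", "").replace(",", "").replace(".", "")
--
--     counter1 = Counter(str1)
--     counter2 = Counter(str2)
--
--     anagrams_str1 = math.factorial(len(str1))
--     for letter in counter1:
--         anagrams_str1 //= math.factorial(counter1[letter])
--
--     anagrams_str2 = math.factorial(len(str2))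
--     for letter in counter2:
--         anagrams_str2 //= math.factorial(counter2[letter])
--
--     return counter1 == counter2, anagrams_str1, anagrams_str2
-- ===== SOURCE B (Python) =====
-- import math
--
-- def anagram_checker(str1, str2):
--     def norm(s):
--         return sorted(s.lower().replace(" ", "").replace(",", "").replace(".", ""))
--
--     def perms(t):
--         result, rem, i = 1, len(t), 0
--         while i < len(t):
--             j = i
--             while j < len(t) and t[j] == t[i]:
--                 j += 1
--             result *= math.comb(rem, j - i)
--             rem -= j - i
--             i = j
--         return result
--
--     t1 = norm(str1)
--     t2 = norm(str2)
--     return t1 == t2, perms(t1), perms(t2)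
-- ===== Notes on version B (the rewrite author's own statement) =====
-- stated objective: alternative
-- what changed: Replaces the Counter-and-factorial multinomial (factorial(len) floor-divided by each count's factorial, plus Counter equality) by sort-and-scan: sort the cleaned string, compare the sorted lists for the anagram check, and build each permutation count as a running product of binomial coefficients over runs of equal characters, never forming the full factorial.
import Mathlib
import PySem

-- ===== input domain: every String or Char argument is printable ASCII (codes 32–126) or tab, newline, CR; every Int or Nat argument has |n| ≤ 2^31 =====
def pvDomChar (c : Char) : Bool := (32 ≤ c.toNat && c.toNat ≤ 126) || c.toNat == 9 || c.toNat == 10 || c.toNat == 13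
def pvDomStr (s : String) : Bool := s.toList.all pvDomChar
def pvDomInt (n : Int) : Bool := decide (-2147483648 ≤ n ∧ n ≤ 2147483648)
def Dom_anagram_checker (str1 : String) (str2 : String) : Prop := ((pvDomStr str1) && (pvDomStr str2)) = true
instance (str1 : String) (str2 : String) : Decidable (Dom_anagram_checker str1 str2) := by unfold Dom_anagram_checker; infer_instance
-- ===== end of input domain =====

-- B replaces A's Counter plus factorial/floor-division multinomials by sort-and-scan: it sorts the cleaned
-- string, compares the sorted lists for the anagram check, and computes each permutation count as a running
-- product of binomial coefficients over the runs of equal characters (objective: alternative algorithm).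

-- ===== PORT A =====
-- shared normalization: s.lower().replace(" ", "").replace(",", "").replace(".", "")
def pvClean (s : String) : String :=
  PySem.Str.replace (PySem.Str.replace (PySem.Str.replace (PySem.Str.lower s) " " "") "," "") "." ""

-- Python dict/Counter equality 'counter1 == counter2' (order-insensitive): same size, every key of d1
-- present in d2 with the same value
def pvDictEq (d1 d2 : PySem.Dict Char Int) : Bool :=
  PySem.Dict.size d1 == PySem.Dict.size d2 &&
    (PySem.Dict.keys d1).all (fun k =>
      PySem.Dict.contains d2 k && (PySem.Dict.getD d1 k 0 == PySem.Dict.getD d2 k 0))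

def anagram_checker (str1 : String) (str2 : String) : Bool × Int × Int :=
  let s1 := pvClean str1
  let s2 := pvClean str2
  let counter1 := PySem.Dict.counter s1.toList
  let counter2 := PySem.Dict.counter s2.toList
  let anagrams1 := (PySem.Dict.keys counter1).foldl
    (fun acc letter => PySem.Int.floordiv acc ((Nat.factorial (PySem.Dict.getD counter1 letter 0).toNat : Int)))
    ((Nat.factorial (PySem.Str.len s1).toNat : Int))
  let anagrams2 := (PySem.Dict.keys counter2).foldl
    (fun acc letter => PySem.Int.floordiv acc ((Nat.factorial (PySem.Dict.getD counter2 letter 0).toNat : Int)))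
    ((Nat.factorial (PySem.Str.len s2).toNat : Int))
  (pvDictEq counter1 counter2, anagrams1, anagrams2)

-- ===== PORT B =====
def pvNorm (s : String) : List Char :=
  PySem.List.sorted (pvClean s).toList (fun c => c) false

-- the run-scanning while loop of B's perms: consume one maximal run of equal characters,
-- multiply by comb(rem, run length), recurse on the rest with rem decreased
def pvPerms : List Char → Nat → Nat
  | [], _ => 1
  | x :: xs, rem =>
      let k := (xs.takeWhile (fun c => c == x)).length + 1
      Nat.choose rem k * pvPerms (xs.dropWhile (fun c => c == x)) (rem - k)
termination_by t _ => t.length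
decreasing_by
  simpa [Nat.lt_succ_iff] using List.length_dropWhile_le (fun c => c == x) xs

def anagram_checker_alt (str1 : String) (str2 : String) : Bool × Int × Int :=
  let t1 := pvNorm str1
  let t2 := pvNorm str2
  (t1 == t2, (pvPerms t1 t1.length : Int), (pvPerms t2 t2.length : Int))

-- ===== PRECONDITION & SPEC =====
def Spec_anagram_checker (str1 : String) (str2 : String) (out : Bool × Int × Int) : Prop := out = anagram_checker_alt str1 str2
instance (str1 : String) (str2 : String) (out : Bool × Int × Int) : Decidable (Spec_anagram_checker str1 str2 out) := by unfold Spec_anagram_checker; infer_instance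

-- ===== CLAIM (what is proved, stated in full; the proofs are below) =====
def Claim_equal_anagram_checker : Prop := ∀ (str1 : String) (str2 : String), Dom_anagram_checker str1 str2 → Spec_anagram_checker str1 str2 (anagram_checker str1 str2)

-- ===== LEMMAS AND PROOFS =====

-- A's sequential floor divisions are exact: with the whole product dividing m, the fold is m / prod
lemma pvFoldDiv (cs : List ℕ) (m : ℕ) (h : (cs.map Nat.factorial).prod ∣ m) :
    List.foldl (fun acc c => PySem.Int.floordiv acc (Nat.factorial c : Int)) (m : Int) cs
      = ((m / (cs.map Nat.factorial).prod : ℕ) : Int) := by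
  induction cs generalizing m with
  | nil => simp
  | cons c cs ih =>
      simp only [List.map_cons, List.prod_cons] at h ⊢
      have h1 : Nat.factorial c ∣ m := dvd_trans (Dvd.intro _ rfl) h
      have h2 : (cs.map Nat.factorial).prod ∣ m / Nat.factorial c :=
        (Nat.dvd_div_iff_mul_dvd h1).mpr h
      simp only [List.foldl_cons, PySem.Int.floordiv_natCast]
      rw [ih _ h2, Nat.div_div_eq_div_mul]

-- B's running product of binomials, times the product of the factorials of the counts
-- (taken over any duplicate-free superset d of t's characters), is (length t)!
lemma pvPermsMul : ∀ (t : List Char), t.Pairwise (· ≤ ·) →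
    ∀ (d : List Char), d.Nodup → (∀ c ∈ t, c ∈ d) →
      pvPerms t t.length * (d.map (fun c => Nat.factorial (t.count c))).prod
        = Nat.factorial t.length
  | [], _, d, _, _ => by
      simp [pvPerms, List.prod_eq_one]
  | x :: xs, hp, d, hnd, hsub => by
      have hxle : ∀ y ∈ xs, x ≤ y := fun y hy => (List.pairwise_cons.mp hp).1 y hy
      have hpxs : xs.Pairwise (· ≤ ·) := (List.pairwise_cons.mp hp).2
      set a := xs.takeWhile (fun c => c == x) with ha
      set b := xs.dropWhile (fun c => c == x) with hb
      have hxs : a ++ b = xs := List.takeWhile_append_dropWhile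
      have hamem : ∀ y ∈ a, y = x := by
        intro y hy
        simpa [beq_iff_eq] using List.mem_takeWhile_imp hy
      have hpb : b.Pairwise (· ≤ ·) := hpxs.sublist (List.dropWhile_sublist _)
      have hbxs : b.Sublist xs := List.dropWhile_sublist _
      have hxb : x ∉ b := by
        intro hxin
        have hbne : b ≠ [] := by intro h; rw [h] at hxin; simp at hxin
        have hne : ((b.head hbne) == x) = false := List.head_dropWhile_not _ hbne
        have hhx : b.head hbne ≠ x := by simpa [beq_iff_eq] using hne
        have hbc : b.head hbne :: b.tail = b := List.cons_head_tail hbne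
        rw [← hbc] at hxin hpb
        rcases List.mem_cons.mp hxin with h1 | h2
        · exact hhx h1.symm
        · have h1 : b.head hbne ≤ x := (List.pairwise_cons.mp hpb).1 x h2
          have h2' : x ≤ b.head hbne := hxle _ (hbxs.subset (List.head_mem hbne))
          exact hhx (le_antisymm h1 h2')
      set n := (x :: xs).length with hn
      set k := a.length + 1 with hk
      have hlen : n = k + b.length := by
        have := congrArg List.length hxs
        simp only [List.length_append] at this
        simp only [hn, hk, List.length_cons]
        omega
      have hkn : k ≤ n := by omega
      have hbn : n - k = b.length := by omega
      have hcount : (x :: xs).count x = k := by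
        have hca : a.count x = a.length :=
          List.count_eq_length.mpr (fun y hy => ((hamem y hy).symm : x = y))
        have hcb : b.count x = 0 := List.count_eq_zero.mpr hxb
        rw [List.count_cons_self, ← hxs, List.count_append, hca, hcb, hk]
      have hcnt_ne : ∀ c, c ≠ x → (x :: xs).count c = b.count c := by
        intro c hc
        have hac : a.count c = 0 := List.count_eq_zero.mpr (fun hca => hc (hamem c hca))
        rw [← hxs, List.count_cons_of_ne (Ne.symm hc), List.count_append, hac, Nat.zero_add]
      have hxd : x ∈ d := hsub x (by simp)
      have hperm : d.Perm (x :: d.erase x) := List.perm_cons_erase hxd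
      have hprod :
          (d.map (fun c => Nat.factorial ((x :: xs).count c))).prod
            = Nat.factorial k * ((d.erase x).map (fun c => Nat.factorial (b.count c))).prod := by
        rw [(hperm.map _).prod_eq]
        simp only [List.map_cons, List.prod_cons, hcount]
        congr 1
        apply congrArg
        apply List.map_congr_left
        intro c hc
        have hcx : c ≠ x := ((List.Nodup.mem_erase_iff hnd).mp hc).1
        rw [hcnt_ne c hcx]
      have hih : pvPerms b b.length
            * ((d.erase x).map (fun c => Nat.factorial (b.count c))).prod
          = Nat.factorial b.length :=
        pvPermsMul b hpb (d.erase x) (hnd.erase x)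
          (fun c hc => (List.Nodup.mem_erase_iff hnd).mpr
            ⟨fun hcx => hxb (hcx ▸ hc), hsub c (List.mem_cons_of_mem _ (hbxs.subset hc))⟩)
      have hunfold : pvPerms (x :: xs) n = Nat.choose n k * pvPerms b (n - k) := by
        rw [pvPerms]
      rw [hunfold, hbn, hprod]
      calc Nat.choose n k * pvPerms b b.length
              * (Nat.factorial k * ((d.erase x).map (fun c => Nat.factorial (b.count c))).prod)
            = Nat.choose n k * Nat.factorial k
              * (pvPerms b b.length * ((d.erase x).map (fun c => Nat.factorial (b.count c))).prod) := by ring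
        _ = Nat.choose n k * Nat.factorial k * Nat.factorial (n - k) := by rw [hih, hbn]
        _ = Nat.factorial n := Nat.choose_mul_factorial_mul_factorial hkn
termination_by t => t.length
decreasing_by
  simpa [Nat.lt_succ_iff, hb] using List.length_dropWhile_le (fun c => c == x) xs

-- A's multinomial fold over the counter equals B's binomial scan over the sorted list
lemma pvVal (l : List Char) :
    (PySem.Dict.keys (PySem.Dict.counter l)).foldl
        (fun acc letter => PySem.Int.floordiv acc
          ((Nat.factorial (PySem.Dict.getD (PySem.Dict.counter l) letter 0).toNat : Int)))
        ((Nat.factorial l.length : Int))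
      = ((pvPerms (PySem.List.sorted l (fun c => c) false)
            (PySem.List.sorted l (fun c => c) false).length : ℕ) : Int) := by
  set t := PySem.List.sorted l (fun c => c) false with ht
  have htp : t.Perm l := PySem.List.sorted_perm l (fun c => c) false
  have htl : t.length = l.length := PySem.List.length_sorted l (fun c => c) false
  have hfun : (fun (acc : Int) letter => PySem.Int.floordiv acc
          ((Nat.factorial (PySem.Dict.getD (PySem.Dict.counter l) letter 0).toNat : Int)))
        = fun (acc : Int) letter => PySem.Int.floordiv acc ((Nat.factorial (l.count letter) : Int)) := by
    funext acc letter
    rw [PySem.Dict.getD_counter, Int.toNat_natCast]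
  rw [PySem.Dict.keys_counter, hfun]
  set d := PySem.Set.ofList l with hd
  set cs := d.map (fun c => l.count c) with hcs
  have hfold : d.foldl (fun acc letter => PySem.Int.floordiv acc ((Nat.factorial (l.count letter) : Int)))
        ((Nat.factorial l.length : Int))
      = cs.foldl (fun acc c => PySem.Int.floordiv acc (Nat.factorial c : Int))
        ((Nat.factorial l.length : Int)) := by
    rw [hcs, List.foldl_map]
  have hmul : pvPerms t t.length * (cs.map Nat.factorial).prod = Nat.factorial l.length := by
    have h0 := pvPermsMul t (PySem.List.sorted_pairwise l (fun c => c)) d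
      (PySem.Set.nodup_ofList l)
      (fun c hc => (PySem.Set.mem_ofList l c).mpr (htp.subset hc))
    have hmap : d.map (fun c => Nat.factorial (t.count c)) = cs.map Nat.factorial := by
      rw [hcs, List.map_map]
      exact List.map_congr_left (fun c _ => by rw [Function.comp_apply, htp.count_eq])
    rw [← htl, ← hmap]
    exact h0
  have hdvd : (cs.map Nat.factorial).prod ∣ Nat.factorial l.length :=
    Dvd.intro_left _ hmul
  rw [hfold, pvFoldDiv cs _ hdvd]
  congr 1
  exact Nat.div_eq_of_eq_mul_left
    (List.prod_pos (by
      intro y hy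
      rcases List.mem_map.mp hy with ⟨c, _, rfl⟩
      exact Nat.factorial_pos _))
    hmul.symm

-- Counter equality is sorted-list equality
lemma pvEq (l1 l2 : List Char) :
    pvDictEq (PySem.Dict.counter l1) (PySem.Dict.counter l2)
      = (PySem.List.sorted l1 (fun c => c) false == PySem.List.sorted l2 (fun c => c) false) := by
  have hsz : ∀ l : List Char, PySem.Dict.size (PySem.Dict.counter l) = (PySem.Set.ofList l).length := by
    intro l
    have := congrArg List.length (PySem.Dict.keys_counter l)
    simpa [PySem.Dict.keys, PySem.Dict.size] using this
  rw [Bool.eq_iff_iff]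
  constructor
  · intro h
    simp only [pvDictEq, Bool.and_eq_true, beq_iff_eq, List.all_eq_true, hsz,
      PySem.Dict.keys_counter, PySem.Dict.contains_counter, PySem.Dict.getD_counter,
      List.contains_eq_mem, decide_eq_true_eq, Nat.cast_inj] at h
    obtain ⟨hlen, hall⟩ := h
    have hsubs : PySem.Set.ofList l1 ⊆ PySem.Set.ofList l2 := by
      intro c hc
      exact (PySem.Set.mem_ofList l2 c).mpr (hall c hc).1
    have hop : (PySem.Set.ofList l1).Perm (PySem.Set.ofList l2) :=
      (List.subperm_of_subset (PySem.Set.nodup_ofList l1) hsubs).perm_of_length_le (le_of_eq hlen.symm)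
    have hcnt : ∀ c, l1.count c = l2.count c := by
      intro c
      by_cases hc : c ∈ l1
      · exact (hall c ((PySem.Set.mem_ofList l1 c).mpr hc)).2
      · have hc2 : c ∉ l2 := by
          intro hc2
          exact hc ((PySem.Set.mem_ofList l1 c).mp
            (hop.mem_iff.mpr ((PySem.Set.mem_ofList l2 c).mpr hc2)))
        rw [List.count_eq_zero.mpr hc, List.count_eq_zero.mpr hc2]
    have hperm : l1.Perm l2 := List.perm_iff_count.mpr hcnt
    simpa [beq_iff_eq] using (PySem.List.sorted_id_eq_sorted_id_iff_perm l1 l2).mpr hperm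
  · intro h
    have hperm : l1.Perm l2 :=
      (PySem.List.sorted_id_eq_sorted_id_iff_perm l1 l2).mp (by simpa [beq_iff_eq] using h)
    have hop : (PySem.Set.ofList l1).Perm (PySem.Set.ofList l2) :=
      (List.perm_ext_iff_of_nodup (PySem.Set.nodup_ofList l1) (PySem.Set.nodup_ofList l2)).mpr
        (fun c => by rw [PySem.Set.mem_ofList, PySem.Set.mem_ofList, hperm.mem_iff])
    simp only [pvDictEq, Bool.and_eq_true, beq_iff_eq, List.all_eq_true, hsz,
      PySem.Dict.keys_counter, PySem.Dict.contains_counter, PySem.Dict.getD_counter,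
      List.contains_eq_mem, decide_eq_true_eq, Nat.cast_inj]
    refine ⟨hop.length_eq, fun c hc => ⟨?_, hperm.count_eq c⟩⟩
    exact hperm.subset ((PySem.Set.mem_ofList l1 c).mp hc)

lemma pvLenToNat (s : String) : (PySem.Str.len s).toNat = s.toList.length := by
  simp [PySem.Str.len_eq]

-- pvVal restated in the exact shape of port A's value component
lemma pvValS (s : String) :
    (PySem.Dict.keys (PySem.Dict.counter s.toList)).foldl
        (fun acc letter => PySem.Int.floordiv acc
          ((Nat.factorial (PySem.Dict.getD (PySem.Dict.counter s.toList) letter 0).toNat : Int)))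
        ((Nat.factorial (PySem.Str.len s).toNat : Int))
      = ((pvPerms (PySem.List.sorted s.toList (fun c => c) false)
            (PySem.List.sorted s.toList (fun c => c) false).length : ℕ) : Int) := by
  rw [pvLenToNat]
  exact pvVal s.toList

-- ===== VERDICT (by name: the statement is the Claim_ definition above) =====
theorem anagram_checker_spec : Claim_equal_anagram_checker := by
  intro str1 str2 _
  show anagram_checker str1 str2 = anagram_checker_alt str1 str2
  simp only [anagram_checker, anagram_checker_alt, pvNorm]
  rw [Prod.mk.injEq, Prod.mk.injEq]
  exact ⟨pvEq _ _, pvValS (pvClean str1), pvValS (pvClean str2)⟩
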